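-- pv_equiv track=rewrite | github.com/pennlabs/penn-courses | backend/courses/management/commands/recommendcourses.py | group_courses
-- ===== SOURCE A (Python) =====
-- from typing import Set, List, Dict, Optional, Tuple, Iterable, Generator
--
-- def group_courses(courses_data: Iterable[Tuple[int, str, str]]):
--     """
--     :param courses_data: An iterable of person id, course string, semester string
--     :return:
--     """
--     # The dict below stores a person_id in association with a dict that associates
--     # a semester with a multiset of the courses taken during that semester. The reason this is a
--     # multiset is to take into account users with multiple mock schedules.
--     # This is an intermediate data form that is used to construct the two dicts returned.
--     courses_by_semester_by_user: Dict[int, Dict[str, Dict[str, int]]] = {}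
--     for person_id, course, semester in courses_data:
--         # maps a course to a list of semesters
--         if person_id not in courses_by_semester_by_user:
--             user_dict = {}
--             courses_by_semester_by_user[person_id] = user_dict
--         else:
--             user_dict = courses_by_semester_by_user[person_id]
--
--         if semester not in user_dict:
--             semester_courses_multiset = {}
--             user_dict[semester] = semester_courses_multiset
--         else:
--             semester_courses_multiset = user_dict[semester]
--
--         if course in semester_courses_multiset:
--             semester_courses_multiset[course] += 1
--         else:
--             semester_courses_multiset[course] = 1
--
--     return courses_by_semester_by_user
-- ===== SOURCE B (Python) =====
-- from typing import Iterable, Tuple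
--
--
-- def group_courses(courses_data: Iterable[Tuple[int, str, str]]):
--     """
--     :param courses_data: An iterable of person id, course string, semester string
--     :return:
--     """
--     # Declarative gather: materialize the stream once, then build the nested
--     # dicts by deduplicating keys in first-occurrence order and counting
--     # occurrences directly, instead of threading mutable nested dicts.
--     data = list(courses_data)
--
--     def multiset(cs):
--         return {c: cs.count(c) for c in dict.fromkeys(cs)}
--
--     def user_dict(pid):
--         rows = [(s, c) for p, c, s in data if p == pid]
--         return {sem: multiset([c for s, c in rows if s == sem])
--                 for sem in dict.fromkeys(s for s, _ in rows)}
--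
--     return {pid: user_dict(pid) for pid in dict.fromkeys(p for p, _, _ in data)}
-- ===== Notes on version B (the rewrite author's own statement) =====
-- stated objective: alternative
-- what changed: Replaces the single-pass mutation of nested dicts with a declarative gather: dedup the person ids (then semesters, then courses) in first-occurrence order and build each level by filtering and counting the materialized list.
import Mathlib
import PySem

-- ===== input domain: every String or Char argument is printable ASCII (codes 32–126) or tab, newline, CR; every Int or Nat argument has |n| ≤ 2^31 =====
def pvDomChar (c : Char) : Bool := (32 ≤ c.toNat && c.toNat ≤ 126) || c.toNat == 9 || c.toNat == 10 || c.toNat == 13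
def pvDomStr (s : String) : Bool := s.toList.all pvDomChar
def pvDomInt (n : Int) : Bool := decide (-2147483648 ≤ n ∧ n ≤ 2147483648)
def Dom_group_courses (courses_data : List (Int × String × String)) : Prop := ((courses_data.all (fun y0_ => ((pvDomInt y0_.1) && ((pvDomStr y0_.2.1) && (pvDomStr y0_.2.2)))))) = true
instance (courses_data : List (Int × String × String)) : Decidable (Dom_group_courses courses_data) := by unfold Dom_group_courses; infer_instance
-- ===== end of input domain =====

-- B replaces A's single-pass mutation of nested dicts with a declarative gather
-- (dedup ids / semesters / courses in first-occurrence order, then filter and count);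
-- objective: alternative decomposition, equal return value (same nested dict contents and order).

-- ===== PORT A =====
-- One step of A's loop body. Python mutates `user_dict` / `semester_courses_multiset`
-- through aliases; functionally this is: read (or default) each nested dict, update the
-- innermost count, and write the updated dicts back (insert overwrites in place, so the
-- final association order is identical to the mutating original).
def stepA (d : PySem.Dict Int (PySem.Dict String (PySem.Dict String Int)))
    (rec : Int × String × String) : PySem.Dict Int (PySem.Dict String (PySem.Dict String Int)) :=
  let pid := rec.1
  let course := rec.2.1
  let sem := rec.2.2
  -- if person_id not in d: user_dict = {} else user_dict = d[person_id]
  let user := if d.contains pid then d.getD pid PySem.Dict.empty else PySem.Dict.empty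
  -- if semester not in user_dict: multiset = {} else multiset = user_dict[semester]
  let ms := if user.contains sem then user.getD sem PySem.Dict.empty else PySem.Dict.empty
  -- if course in multiset: multiset[course] += 1 else multiset[course] = 1
  let ms' := if ms.contains course then ms.insert course (ms.getD course 0 + 1)
             else ms.insert course 1
  d.insert pid (user.insert sem ms')

def group_courses (courses_data : List (Int × String × String)) :
    List (Int × List (String × List (String × Int))) :=
  -- the nested Python dicts rendered as nested association lists (insertion order)
  (courses_data.foldl stepA PySem.Dict.empty).items.map
    (fun p => (p.1, p.2.items.map (fun q => (q.1, q.2.items))))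

-- ===== PORT B =====
-- {c: cs.count(c) for c in dict.fromkeys(cs)} — a dict comprehension over the
-- already-distinct keys dict.fromkeys(cs) = PySem.List.dedup cs, so its items are this map
def multisetB (cs : List String) : List (String × Int) :=
  (PySem.List.dedup cs).map (fun c => (c, (cs.count c : Int)))

def user_dictB (data : List (Int × String × String)) (pid : Int) :
    List (String × List (String × Int)) :=
  let rows := (data.filter (fun r => r.1 == pid)).map (fun r => (r.2.2, r.2.1))
  (PySem.List.dedup (rows.map (·.1))).map
    (fun sem => (sem, multisetB ((rows.filter (fun q => q.1 == sem)).map (·.2))))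

def group_courses_alt (courses_data : List (Int × String × String)) :
    List (Int × List (String × List (String × Int))) :=
  (PySem.List.dedup (courses_data.map (·.1))).map
    (fun pid => (pid, user_dictB courses_data pid))

-- ===== PRECONDITION & SPEC =====
def Spec_group_courses (courses_data : List (Int × String × String)) (out : List (Int × List (String × List (String × Int)))) : Prop := out = group_courses_alt courses_data
instance (courses_data : List (Int × String × String)) (out : List (Int × List (String × List (String × Int)))) : Decidable (Spec_group_courses courses_data out) := by unfold Spec_group_courses; infer_instance

-- ===== CLAIM (what is proved, stated in full; the proofs are below) =====
def Claim_equal_group_courses : Prop := ∀ (courses_data : List (Int × String × String)), Dom_group_courses courses_data → Spec_group_courses courses_data (group_courses courses_data)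

-- ===== LEMMAS AND PROOFS =====

-- branch-free form of A's innermost update
def stepMS (m : PySem.Dict String Int) (c : String) : PySem.Dict String Int :=
  m.insert c (m.getD c 0 + 1)

def stepU (u : PySem.Dict String (PySem.Dict String Int)) (q : String × String) :
    PySem.Dict String (PySem.Dict String Int) :=
  u.insert q.1 (stepMS (u.getD q.1 PySem.Dict.empty) q.2)

def stepD (d : PySem.Dict Int (PySem.Dict String (PySem.Dict String Int)))
    (r : Int × String × String) : PySem.Dict Int (PySem.Dict String (PySem.Dict String Int)) :=
  d.insert r.1 (stepU (d.getD r.1 PySem.Dict.empty) (r.2.2, r.2.1))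

theorem if_contains_getD {κ ν : Type} [BEq κ] (d : PySem.Dict κ ν) (k : κ) (v : ν) :
    (if d.contains k then d.getD k v else v) = d.getD k v := by
  rcases h : d.contains k with _ | _
  · simp [PySem.Dict.getD_of_not_contains _ _ h]
  · simp

theorem if_contains_insert {κ : Type} [BEq κ] (m : PySem.Dict κ Int) (c : κ) :
    (if m.contains c then m.insert c (m.getD c 0 + 1) else m.insert c 1) =
      m.insert c (m.getD c 0 + 1) := by
  rcases h : m.contains c with _ | _
  · simp [PySem.Dict.getD_of_not_contains _ _ h]
  · simp

theorem stepA_eq_stepD : stepA = stepD := by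
  funext d r
  simp only [stepA, stepD, stepU, stepMS, if_contains_getD, if_contains_insert]

def Fms (cs : List String) : PySem.Dict String Int :=
  cs.foldl (fun m c => m.insert c (m.getD c 0 + 1)) PySem.Dict.empty

def Fu (rows : List (String × String)) : PySem.Dict String (PySem.Dict String Int) :=
  rows.foldl stepU PySem.Dict.empty

def Fd (data : List (Int × String × String)) :
    PySem.Dict Int (PySem.Dict String (PySem.Dict String Int)) :=
  data.foldl stepD PySem.Dict.empty

theorem Fu_getD (rows : List (String × String)) (sem : String) :
    (Fu rows).getD sem PySem.Dict.empty =
      Fms ((rows.filter (fun q => q.1 == sem)).map (·.2)) := by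
  induction rows using List.reverseRecOn with
  | nil => simp [Fu, Fms]
  | append_singleton rows q ih =>
    have h1 : Fu (rows ++ [q]) = stepU (Fu rows) q := by
      simp [Fu, List.foldl_append]
    rw [h1, stepU, PySem.Dict.getD_insert]
    by_cases h : sem = q.1
    · subst h
      rw [if_pos rfl, ih]
      simp [List.filter_append, Fms, List.foldl_append, stepMS]
    · rw [if_neg h, ih]
      simp [List.filter_append, Ne.symm h]

theorem Fd_getD (data : List (Int × String × String)) (pid : Int) :
    (Fd data).getD pid PySem.Dict.empty =
      Fu ((data.filter (fun r => r.1 == pid)).map (fun r => (r.2.2, r.2.1))) := by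
  induction data using List.reverseRecOn with
  | nil => simp [Fd, Fu]
  | append_singleton data r ih =>
    have h1 : Fd (data ++ [r]) = stepD (Fd data) r := by
      simp [Fd, List.foldl_append]
    rw [h1, stepD, PySem.Dict.getD_insert]
    by_cases h : pid = r.1
    · subst h
      rw [if_pos rfl, ih]
      simp [List.filter_append, Fu, List.foldl_append]
    · rw [if_neg h, ih]
      simp [List.filter_append, Ne.symm h]

theorem Fu_items (rows : List (String × String)) :
    (Fu rows).items = (PySem.List.dedup (rows.map (·.1))).map
      (fun sem => (sem, Fms ((rows.filter (fun q => q.1 == sem)).map (·.2)))) := by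
  have hnd : (Fu rows).keys.Nodup := by
    have := PySem.Dict.nodup_keys_foldl_insert_key rows (fun q => q.1)
      (fun u q => stepMS (u.getD q.1 PySem.Dict.empty) q.2) PySem.Dict.empty (by simp)
    simpa [Fu, stepU] using this
  have hkeys : (Fu rows).keys = PySem.List.dedup (rows.map (·.1)) := by
    have := PySem.Dict.keys_foldl_insert_key rows (fun q => q.1)
      (fun u q => stepMS (u.getD q.1 PySem.Dict.empty) q.2) PySem.Dict.empty
    simpa [Fu, stepU, PySem.Set.update_nil_left, PySem.List.dedup_eq_ofList] using this
  rw [PySem.Dict.items_eq_map_keys _ hnd PySem.Dict.empty, hkeys]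
  exact List.map_congr_left (fun sem _ => by rw [Fu_getD])

theorem Fms_items (cs : List String) :
    (Fms cs).items = multisetB cs := by
  rw [show Fms cs = PySem.Dict.counter cs from
        PySem.Dict.foldl_insert_getD_add_one_eq_counter cs]
  rw [PySem.Dict.items_counter]
  simp [multisetB, PySem.List.dedup_eq_ofList]

theorem Fd_items (data : List (Int × String × String)) :
    (Fd data).items = (PySem.List.dedup (data.map (·.1))).map
      (fun pid => (pid, Fu ((data.filter (fun r => r.1 == pid)).map (fun r => (r.2.2, r.2.1))))) := by
  have hnd : (Fd data).keys.Nodup := by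
    have := PySem.Dict.nodup_keys_foldl_insert_key data (fun r => r.1)
      (fun d r => stepU (d.getD r.1 PySem.Dict.empty) (r.2.2, r.2.1)) PySem.Dict.empty (by simp)
    simpa [Fd, stepD] using this
  have hkeys : (Fd data).keys = PySem.List.dedup (data.map (·.1)) := by
    have := PySem.Dict.keys_foldl_insert_key data (fun r => r.1)
      (fun d r => stepU (d.getD r.1 PySem.Dict.empty) (r.2.2, r.2.1)) PySem.Dict.empty
    simpa [Fd, stepD, PySem.Set.update_nil_left, PySem.List.dedup_eq_ofList] using this
  rw [PySem.Dict.items_eq_map_keys _ hnd PySem.Dict.empty, hkeys]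
  exact List.map_congr_left (fun pid _ => by rw [Fd_getD])

-- ===== VERDICT (by name: the statement is the Claim_ definition above) =====
theorem group_courses_spec : Claim_equal_group_courses := by
  intro data _
  unfold Spec_group_courses group_courses
  rw [show data.foldl stepA PySem.Dict.empty = Fd data by rw [stepA_eq_stepD]; rfl]
  rw [Fd_items]
  unfold group_courses_alt user_dictB
  simp only [List.map_map]
  refine List.map_congr_left (fun pid _ => ?_)
  simp only [Function.comp]
  refine congrArg (Prod.mk pid) ?_
  rw [Fu_items]
  simp only [List.map_map]
  refine List.map_congr_left (fun sem _ => ?_)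
  simp only [Function.comp]
  refine congrArg (Prod.mk sem) ?_
  rw [Fms_items]
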